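-- pv_equiv track=rewrite | github.com/Pavithra18804/Altruisty | prog3/prog3.py | min_of_max_in_subarrays
-- ===== SOURCE A (Python) =====
-- from collections import deque
--
-- def min_of_max_in_subarrays(arr, n, k):
--     # List to store maximums of each subarray of size k
--     max_in_subarrays = []
--     # Deque to store indexes of useful elements in each window of size k
--     dq = deque()
--
--     for i in range(n):
--         # Remove elements that are out of this window
--         while dq and dq[0] <= i - k:
--             dq.popleft()
--
--         # Remove all elements in the deque that are less than the current element
--         # (we only need the maximum elements)
--         while dq and arr[dq[-1]] <= arr[i]:
--             dq.pop()
--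
--         # Add current element at the rear of the deque
--         dq.append(i)
--
--         # Append the maximum of the current window to the result list
--         # We start adding to the list after we've processed the first window
--         if i >= k - 1:
--             max_in_subarrays.append(arr[dq[0]])
--
--     # Find and return the minimum of all maximums
--     return min(max_in_subarrays)
-- ===== SOURCE B (Python) =====
-- def min_of_max_in_subarrays(arr, n, k):
--     window_maxes = []
--     for i in range(n):
--         if i >= k - 1:
--             m = arr[i]
--             for j in range(max(i - k + 1, 0), i):
--                 if arr[j] > m:
--                     m = arr[j]
--             window_maxes.append(m)
--     return min(window_maxes)
-- ===== Notes on version B (the rewrite author's own statement) =====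
-- stated objective: alternative
-- what changed: Replaced the monotonic-deque single pass (an index deque maintained across windows with two while-pop loops) by a naive rescan: for each window end i, recompute the window maximum directly with a running max over the window's indices, collect these, then take min; nothing is maintained across windows.
import Mathlib
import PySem

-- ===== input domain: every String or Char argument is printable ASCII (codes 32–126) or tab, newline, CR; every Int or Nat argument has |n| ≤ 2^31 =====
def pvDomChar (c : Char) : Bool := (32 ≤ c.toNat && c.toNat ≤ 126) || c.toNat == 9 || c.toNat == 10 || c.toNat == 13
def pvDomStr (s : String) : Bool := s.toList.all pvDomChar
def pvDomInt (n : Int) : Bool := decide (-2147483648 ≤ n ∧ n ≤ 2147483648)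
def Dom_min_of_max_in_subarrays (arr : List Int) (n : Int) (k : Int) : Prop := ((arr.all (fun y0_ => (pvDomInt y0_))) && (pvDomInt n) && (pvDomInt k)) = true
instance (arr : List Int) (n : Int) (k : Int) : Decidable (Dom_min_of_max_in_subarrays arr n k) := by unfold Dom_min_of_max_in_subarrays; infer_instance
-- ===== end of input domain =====

-- B replaces A's monotonic-deque single pass by the naive alternative: each window's
-- maximum is recomputed independently by a fresh rescan, then the minimum is taken (not faster).

-- ===== PORT A =====
-- one iteration of A's "for i in range(n)" loop; state = (max_in_subarrays, dq);
-- the two "while … pop" loops are the two dropWhile's (popleft = dropWhile at the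
-- front, pop = dropWhile on the reversed list); arr[...] = pyGetD (always in range under Pre_)
def pvStepA (arr : List Int) (k : Int) (st : List Int × List Int) (i : Int) : List Int × List Int :=
  let dq := st.2.dropWhile (fun j => decide (j ≤ i - k))
  let dq := (dq.reverse.dropWhile (fun j => decide (PySem.List.pyGetD arr j 0 ≤ PySem.List.pyGetD arr i 0))).reverse
  let dq := dq ++ [i]
  let res := if i ≥ k - 1 then st.1 ++ [PySem.List.pyGetD arr (PySem.List.pyGetD dq 0 0) 0] else st.1
  (res, dq)

def min_of_max_in_subarrays (arr : List Int) (n : Int) (k : Int) : Int :=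
  let fin := (PySem.List.pyRange 0 n 1).foldl (pvStepA arr k) ([], [])
  (PySem.List.min? fin.1 (fun x => x)).getD 0

-- ===== PORT B =====
def min_of_max_in_subarrays_alt (arr : List Int) (n : Int) (k : Int) : Int :=
  let window_maxes := (PySem.List.pyRange 0 n 1).foldl (fun acc i =>
    if i ≥ k - 1 then
      acc ++ [(PySem.List.pyRange (max (i - k + 1) 0) i 1).foldl
        (fun m j => if PySem.List.pyGetD arr j 0 > m then PySem.List.pyGetD arr j 0 else m)
        (PySem.List.pyGetD arr i 0)]
    else acc) []
  (PySem.List.min? window_maxes (fun x => x)).getD 0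

-- ===== PRECONDITION & SPEC =====
-- Pre_ is exactly where A returns normally; it excludes only inputs on which A raises:
-- n > len(arr) (IndexError from arr[i]) and n < max(1, k) (min([]) → ValueError; B raises there too).
def Pre_min_of_max_in_subarrays (arr : List Int) (n : Int) (k : Int) : Prop :=
  1 ≤ n ∧ k ≤ n ∧ n ≤ (arr.length : Int)
instance (arr : List Int) (n : Int) (k : Int) : Decidable (Pre_min_of_max_in_subarrays arr n k) := by
  unfold Pre_min_of_max_in_subarrays; infer_instance

def pvWitness_min_of_max_in_subarrays : List Int × Int × Int := ([3, 1, 4, 1, 5], 5, 3)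

def Spec_min_of_max_in_subarrays (arr : List Int) (n : Int) (k : Int) (out : Int) : Prop := out = min_of_max_in_subarrays_alt arr n k
instance (arr : List Int) (n : Int) (k : Int) (out : Int) : Decidable (Spec_min_of_max_in_subarrays arr n k out) := by unfold Spec_min_of_max_in_subarrays; infer_instance

-- ===== CLAIM (what is proved, stated in full; the proofs are below) =====
def Claim_equal_min_of_max_in_subarrays : Prop := ∀ (arr : List Int) (n : Int) (k : Int), Dom_min_of_max_in_subarrays arr n k → Pre_min_of_max_in_subarrays arr n k → Spec_min_of_max_in_subarrays arr n k (min_of_max_in_subarrays arr n k)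

-- ===== LEMMAS AND PROOFS =====

-- the maximum of A's window of size k ending at index t (meaningful for k-1 ≤ t)
def pvWmax (arr : List Int) (k : Int) (t : Int) : Int :=
  (PySem.List.max? (PySem.List.slice arr (some (t - k + 1)) (some (t + 1))) (fun x => x)).getD 0

-- after dropWhile (f · ≤ c) on a list whose f-values strictly increase, every survivor has f > c
theorem pv_dropWhile_all (f : Int → Int) (c : Int) (l : List Int)
    (hp : l.Pairwise (fun a b => f a < f b)) :
    ∀ d ∈ l.dropWhile (fun j => decide (f j ≤ c)), c < f d := by
  induction l with
  | nil => intro d hd; cases hd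
  | cons a l ih =>
    intro d hd
    rw [List.dropWhile_cons] at hd
    by_cases ha : f a ≤ c
    · simp only [decide_eq_true_eq, ha, if_pos] at hd
      exact ih (List.Pairwise.of_cons hp) d hd
    · simp only [decide_eq_true_eq, ha, if_neg, not_false_iff] at hd
      rcases List.mem_cons.mp hd with rfl | hd'
      · omega
      · have h2 := (List.pairwise_cons.mp hp).1 d hd'
        omega

-- an element failing the predicate is never removed by dropWhile
theorem pv_mem_dropWhile (p : Int → Bool) (l : List Int) (x : Int) (hx : x ∈ l)
    (h : p x = false) : x ∈ l.dropWhile p := by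
  have h2 : l.takeWhile p ++ l.dropWhile p = l := List.takeWhile_append_dropWhile
  rcases List.mem_append.mp (by rw [h2]; exact hx) with h1 | h1
  · have := List.mem_takeWhile_imp h1
    rw [h] at this; cases this
  · exact h1

-- the head of a list with strictly decreasing f-values carries the maximal f-value
theorem pv_head_max (f : Int → Int) (h : Int) (t : List Int)
    (hp : (h :: t).Pairwise (fun a b => f b < f a)) : ∀ d ∈ h :: t, f d ≤ f h := by
  intro d hd
  rcases List.mem_cons.mp hd with rfl | hd'
  · exact le_refl _
  · exact le_of_lt ((List.pairwise_cons.mp hp).1 d hd')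

-- pvWmax equals arr[h] when h lies in the window and dominates every window element
theorem pv_wmax_eq (arr : List Int) (k i h : Int) (hk : 1 ≤ k) (hik : k - 1 ≤ i)
    (hiL : i < (arr.length : Int))
    (h0 : 0 ≤ h) (hw1 : i - k < h) (hw2 : h ≤ i)
    (hmax : ∀ j : Int, 0 ≤ j → i - k < j → j ≤ i →
      PySem.List.pyGetD arr j 0 ≤ PySem.List.pyGetD arr h 0) :
    pvWmax arr k i = PySem.List.pyGetD arr h 0 := by
  unfold pvWmax
  have hs0 : (0:Int) ≤ i - k + 1 := by omega
  have he0 : (0:Int) ≤ i + 1 := by omega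
  rw [PySem.List.slice_toNat arr hs0 he0]
  have hsE : ((i - k + 1).toNat : Int) = i - k + 1 := Int.toNat_of_nonneg hs0
  have heE : ((i + 1).toNat : Int) = i + 1 := Int.toNat_of_nonneg he0
  generalize hgs : (i - k + 1).toNat = s at hsE ⊢
  generalize hge : (i + 1).toNat = e at heE ⊢
  have hlen : (List.take (e - s) (List.drop s arr)).length = e - s := by
    rw [List.length_take, List.length_drop]; omega
  have hget : ∀ (u : Nat) (hu : u < (List.take (e - s) (List.drop s arr)).length),
      (List.take (e - s) (List.drop s arr))[u]
        = arr[s + u]'(by rw [hlen] at hu; omega) := by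
    intro u hu
    rw [List.getElem_take, List.getElem_drop]
  have hhmem : PySem.List.pyGetD arr h 0 ∈ List.take (e - s) (List.drop s arr) := by
    have hidx : h.toNat - s < (List.take (e - s) (List.drop s arr)).length := by
      rw [hlen]; omega
    refine List.mem_iff_getElem.mpr ⟨h.toNat - s, hidx, ?_⟩
    rw [hget _ hidx, PySem.List.pyGetD_eq_getElem arr 0 h0 (by omega)]
    congr 1; omega
  have hub : ∀ x ∈ List.take (e - s) (List.drop s arr), x ≤ PySem.List.pyGetD arr h 0 := by
    intro x hx
    obtain ⟨u, hu, hxu⟩ := List.mem_iff_getElem.mp hx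
    rw [hget u hu] at hxu
    have hub' : u < e - s := by rw [hlen] at hu; omega
    have hj := hmax ((s + u : Nat) : Int) (by positivity) (by omega) (by omega)
    rw [PySem.List.pyGetD_natCast, List.getD_eq_getElem _ _ (by omega)] at hj
    rw [← hxu]; exact hj
  cases hmq : PySem.List.max? (List.take (e - s) (List.drop s arr)) (fun x => x) with
  | none =>
    rw [PySem.List.max?_eq_none_iff] at hmq
    rw [hmq] at hhmem; cases hhmem
  | some m =>
    have hle1 := PySem.List.max?_isMax hmq _ hhmem
    have hle2 := hub m (PySem.List.max?_mem hmq)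
    simp only [Option.getD_some]
    omega

-- the loop invariant of A's pass: after m iterations the result list holds the window
-- maxima seen so far and dq is a monotonic deque covering the current window
theorem pv_inv (arr : List Int) (n k : Int) (h1 : 1 ≤ k) (h3 : n ≤ (arr.length : Int)) :
    ∀ m : Nat, (m : Int) ≤ n →
      ((PySem.List.pyRange 0 (m : Int) 1).foldl (pvStepA arr k) ([], [])).1
        = (PySem.List.pyRange (k - 1) (m : Int) 1).map (pvWmax arr k)
      ∧ ((PySem.List.pyRange 0 (m : Int) 1).foldl (pvStepA arr k) ([], [])).2.Pairwise (· < ·)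
      ∧ ((PySem.List.pyRange 0 (m : Int) 1).foldl (pvStepA arr k) ([], [])).2.Pairwise
          (fun a b => PySem.List.pyGetD arr b 0 < PySem.List.pyGetD arr a 0)
      ∧ (∀ d ∈ ((PySem.List.pyRange 0 (m : Int) 1).foldl (pvStepA arr k) ([], [])).2,
            0 ≤ d ∧ (m : Int) - 1 - k < d ∧ d ≤ (m : Int) - 1)
      ∧ (∀ j : Int, 0 ≤ j → (m : Int) - 1 - k < j → j ≤ (m : Int) - 1 →
            ∃ d ∈ ((PySem.List.pyRange 0 (m : Int) 1).foldl (pvStepA arr k) ([], [])).2,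
              j ≤ d ∧ PySem.List.pyGetD arr j 0 ≤ PySem.List.pyGetD arr d 0) := by
  intro m
  induction m with
  | zero =>
    intro _
    simp only [Nat.cast_zero, PySem.List.pyRange_one_eq_nil (le_refl (0:Int)),
      PySem.List.pyRange_one_eq_nil (by omega : (0:Int) ≤ k - 1), List.foldl_nil, List.map_nil]
    refine ⟨by simp, by simp, by simp, by simp, ?_⟩
    intro j hj0 _ hj2
    omega
  | succ m ih =>
    intro hm1
    have hmn : (m : Int) ≤ n := by push_cast at hm1 ⊢; omega
    obtain ⟨hres, hinc, hdec, hbnd, hcov⟩ := ih hmn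
    set i : Int := (m : Int) with hi
    have hcast : ((m + 1 : Nat) : Int) = i + 1 := by push_cast; omega
    rw [hcast, PySem.List.pyRange_one_succ_right (by positivity : (0:Int) ≤ i),
      List.foldl_append, List.foldl_cons, List.foldl_nil]
    set st := (PySem.List.pyRange 0 i 1).foldl (pvStepA arr k) (([], []) : List Int × List Int)
      with hst
    set dq1 := st.2.dropWhile (fun j => decide (j ≤ i - k)) with hdq1
    set dq2 := (dq1.reverse.dropWhile
        (fun j => decide (PySem.List.pyGetD arr j 0 ≤ PySem.List.pyGetD arr i 0))).reverse
      with hdq2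
    set dq3 := dq2 ++ [i] with hdq3
    have hstep : pvStepA arr k st i
        = (if i ≥ k - 1 then st.1 ++ [PySem.List.pyGetD arr (PySem.List.pyGetD dq3 0 0) 0]
           else st.1, dq3) := rfl
    rw [hstep]
    -- facts about dq1
    have hdq1inc : dq1.Pairwise (· < ·) :=
      List.Pairwise.sublist (List.dropWhile_sublist _) hinc
    have hdq1dec : dq1.Pairwise
        (fun a b => PySem.List.pyGetD arr b 0 < PySem.List.pyGetD arr a 0) :=
      List.Pairwise.sublist (List.dropWhile_sublist _) hdec
    have hdq1mem : ∀ d ∈ dq1, d ∈ st.2 := fun d hd =>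
      List.Sublist.mem hd (List.dropWhile_sublist _)
    have hdq1gt : ∀ d ∈ dq1, i - k < d :=
      pv_dropWhile_all (fun j => j) (i - k) st.2 hinc
    -- facts about dq2
    have hdq2rev : dq2.reverse = dq1.reverse.dropWhile
        (fun j => decide (PySem.List.pyGetD arr j 0 ≤ PySem.List.pyGetD arr i 0)) := by
      rw [hdq2, List.reverse_reverse]
    have hrev1 : dq1.reverse.Pairwise
        (fun a b => PySem.List.pyGetD arr a 0 < PySem.List.pyGetD arr b 0) :=
      List.pairwise_reverse.mpr hdq1dec
    have hdq2mem : ∀ d ∈ dq2, d ∈ dq1 := by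
      intro d hd
      have hd' : d ∈ dq2.reverse := List.mem_reverse.mpr hd
      rw [hdq2rev] at hd'
      exact List.mem_reverse.mp (List.Sublist.mem hd' (List.dropWhile_sublist _))
    have hdq2inc : dq2.Pairwise (· < ·) := by
      have h' : dq2.reverse.Pairwise (fun a b : Int => b < a) := by
        rw [hdq2rev]
        exact List.Pairwise.sublist (List.dropWhile_sublist _)
          (List.pairwise_reverse.mpr hdq1inc)
      exact List.pairwise_reverse.mp h'
    have hdq2dec : dq2.Pairwise
        (fun a b => PySem.List.pyGetD arr b 0 < PySem.List.pyGetD arr a 0) := by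
      have h' : dq2.reverse.Pairwise
          (fun a b => PySem.List.pyGetD arr a 0 < PySem.List.pyGetD arr b 0) := by
        rw [hdq2rev]
        exact List.Pairwise.sublist (List.dropWhile_sublist _) hrev1
      exact List.pairwise_reverse.mp h'
    have hdq2val : ∀ d ∈ dq2, PySem.List.pyGetD arr i 0 < PySem.List.pyGetD arr d 0 := by
      intro d hd
      have hd' : d ∈ dq2.reverse := List.mem_reverse.mpr hd
      rw [hdq2rev] at hd'
      exact pv_dropWhile_all (fun j => PySem.List.pyGetD arr j 0)
        (PySem.List.pyGetD arr i 0) dq1.reverse hrev1 d hd'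
    -- facts about dq3
    have hdq3bnd : ∀ d ∈ dq3, 0 ≤ d ∧ (i + 1) - 1 - k < d ∧ d ≤ (i + 1) - 1 := by
      intro d hd
      rcases List.mem_append.mp hd with hd' | hd'
      · have h2 := hbnd d (hdq1mem d (hdq2mem d hd'))
        have h3 := hdq1gt d (hdq2mem d hd')
        exact ⟨h2.1, by omega, by omega⟩
      · have : d = i := by simpa using hd'
        subst this
        exact ⟨by positivity, by omega, by omega⟩
    have hdq3inc : dq3.Pairwise (· < ·) := by
      rw [hdq3, List.pairwise_append]
      refine ⟨hdq2inc, by simp, ?_⟩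
      intro a ha b hb
      have hb' : b = i := by simpa using hb
      have h2 := hbnd a (hdq1mem a (hdq2mem a ha))
      omega
    have hdq3dec : dq3.Pairwise
        (fun a b => PySem.List.pyGetD arr b 0 < PySem.List.pyGetD arr a 0) := by
      rw [hdq3, List.pairwise_append]
      refine ⟨hdq2dec, by simp, ?_⟩
      intro a ha b hb
      have hb' : b = i := by simpa using hb
      subst hb'
      exact hdq2val a ha
    have hcov3 : ∀ j : Int, 0 ≤ j → (i + 1) - 1 - k < j → j ≤ (i + 1) - 1 →
        ∃ d ∈ dq3, j ≤ d ∧ PySem.List.pyGetD arr j 0 ≤ PySem.List.pyGetD arr d 0 := by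
      intro j hj0 hjl hjr
      by_cases hji : j = i
      · exact ⟨i, List.mem_append.mpr (Or.inr (by simp)), by omega, by rw [hji]⟩
      · obtain ⟨d, hdmem, hjd, hgd⟩ := hcov j hj0 (by omega) (by omega)
        have hd1 : d ∈ dq1 := by
          refine pv_mem_dropWhile _ _ _ hdmem ?_
          simp only [decide_eq_false_iff_not, not_le]
          omega
        by_cases hd2 : PySem.List.pyGetD arr d 0 ≤ PySem.List.pyGetD arr i 0
        · exact ⟨i, List.mem_append.mpr (Or.inr (by simp)), by omega, le_trans hgd hd2⟩
        · have hd3 : d ∈ dq2 := by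
            rw [← List.mem_reverse, hdq2rev]
            refine pv_mem_dropWhile _ _ _ (List.mem_reverse.mpr hd1) ?_
            simp only [decide_eq_false_iff_not]
            exact hd2
          exact ⟨d, List.mem_append.mpr (Or.inl hd3), hjd, hgd⟩
    refine ⟨?_, hdq3inc, hdq3dec, hdq3bnd, hcov3⟩
    -- the result-list component
    by_cases hik : k - 1 ≤ i
    · rw [if_pos (by omega : i ≥ k - 1)]
      rw [PySem.List.pyRange_one_succ_right hik, List.map_append, List.map_cons, List.map_nil]
      rw [hres]
      obtain ⟨h, t', hht⟩ : ∃ h t', dq3 = h :: t' := by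
        rcases dq3 with _ | ⟨h, t'⟩
        · exact absurd (congrArg List.length hdq3) (by simp)
        · exact ⟨h, t', rfl⟩
      rw [hht, PySem.List.pyGetD_zero_cons]
      have hhmem : h ∈ dq3 := by rw [hht]; exact List.mem_cons_self
      have hhb := hdq3bnd h hhmem
      have hmaxh : ∀ j : Int, 0 ≤ j → i - k < j → j ≤ i →
          PySem.List.pyGetD arr j 0 ≤ PySem.List.pyGetD arr h 0 := by
        intro j hj0 hjl hjr
        obtain ⟨d, hdmem, _, hgd⟩ := hcov3 j hj0 (by omega) (by omega)
        have := pv_head_max (fun j => PySem.List.pyGetD arr j 0) h t' (hht ▸ hdq3dec) d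
          (hht ▸ hdmem)
        exact le_trans hgd this
      have hiL : i < (arr.length : Int) := by omega
      rw [pv_wmax_eq arr k i h h1 hik hiL hhb.1 (by omega) (by omega) hmaxh]
    · rw [if_neg (by omega : ¬ i ≥ k - 1)]
      rw [hres, PySem.List.pyRange_one_eq_nil (by omega : i ≤ k - 1),
        PySem.List.pyRange_one_eq_nil (by omega : i + 1 ≤ k - 1)]

-- the filter produced by B's "if i >= k - 1" guard is itself a range (for 0 ≤ c)
theorem pv_range_filter (c : Int) (hc : 0 ≤ c) : ∀ m : Nat,
    ((PySem.List.pyRange 0 (m : Int) 1).filter (fun i => decide (i ≥ c)))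
      = PySem.List.pyRange c (m : Int) 1 := by
  intro m
  induction m with
  | zero =>
    simp [PySem.List.pyRange_one_eq_nil (le_refl (0:Int)),
      PySem.List.pyRange_one_eq_nil hc]
  | succ m ih =>
    have hcast : ((m + 1 : Nat) : Int) = (m : Int) + 1 := by push_cast; ring
    rw [hcast, PySem.List.pyRange_one_succ_right (by positivity : (0:Int) ≤ (m : Int)),
      List.filter_append, ih]
    by_cases hcm : c ≤ (m : Int)
    · rw [PySem.List.pyRange_one_succ_right hcm]
      simp [hcm]
    · rw [PySem.List.pyRange_one_eq_nil (by omega : (m : Int) + 1 ≤ c),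
        PySem.List.pyRange_one_eq_nil (by omega : (m : Int) ≤ c)]
      simp [hcm]

-- B's inner rescan (running max seeded with arr[i]) computes the window maximum
theorem pv_inner (arr : List Int) (k i : Int) (hk : 1 ≤ k) (hik : k - 1 ≤ i)
    (hiL : i < (arr.length : Int)) :
    (PySem.List.pyRange (max (i - k + 1) 0) i 1).foldl
      (fun m j => if PySem.List.pyGetD arr j 0 > m then PySem.List.pyGetD arr j 0 else m)
      (PySem.List.pyGetD arr i 0) = pvWmax arr k i := by
  have hcl : max (i - k + 1) 0 = i - k + 1 := by omega
  rw [hcl]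
  rw [PySem.List.foldl_congr_mem _ _
    (fun m j => max m (PySem.List.pyGetD arr j 0)) _
    (by
      intro acc x _
      show _ = max acc (PySem.List.pyGetD arr x 0)
      split_ifs with h <;> omega)]
  rw [← List.foldl_map (f := fun j => PySem.List.pyGetD arr j 0) (g := max)]
  set G := (PySem.List.pyRange (i - k + 1) i 1).map (fun j => PySem.List.pyGetD arr j 0)
    with hG
  set v := G.foldl max (PySem.List.pyGetD arr i 0) with hv
  have hub := PySem.List.le_foldl_max G (PySem.List.pyGetD arr i 0)
  have hmaxv : ∀ j : Int, 0 ≤ j → i - k < j → j ≤ i →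
      PySem.List.pyGetD arr j 0 ≤ v := by
    intro j _ hjl hjr
    rcases eq_or_lt_of_le hjr with rfl | hji
    · exact hub.1
    · refine hub.2 _ ?_
      rw [hG]
      exact List.mem_map.mpr ⟨j, PySem.List.mem_pyRange_one.mpr ⟨by omega, hji⟩, rfl⟩
  obtain ⟨h, hh0, hhl, hhr, hhv⟩ : ∃ h : Int, 0 ≤ h ∧ i - k < h ∧ h ≤ i ∧
      PySem.List.pyGetD arr h 0 = v := by
    rcases PySem.List.foldl_max_mem G (PySem.List.pyGetD arr i 0) with he | he
    · exact ⟨i, by omega, by omega, le_refl _, by rw [hv, he]⟩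
    · rw [hG] at he
      obtain ⟨j, hjmem, hjv⟩ := List.mem_map.mp he
      have hj := PySem.List.mem_pyRange_one.mp hjmem
      exact ⟨j, by omega, by omega, by omega, by rw [hjv]⟩
  rw [pv_wmax_eq arr k i h hk hik hiL hh0 hhl hhr (by intro j a b c; rw [hhv]; exact hmaxv j a b c)]
  exact hhv.symm

-- for k ≤ 0 A's deque always collapses to [i]: the result list is just the prefix of arr
theorem pv_inv_nonpos (arr : List Int) (k : Int) (hk : k ≤ 0) : ∀ m : Nat,
    (PySem.List.pyRange 0 (m : Int) 1).foldl (pvStepA arr k) ([], [])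
      = ((PySem.List.pyRange 0 (m : Int) 1).map (fun t => PySem.List.pyGetD arr t 0),
         if m = 0 then ([] : List Int) else [(m : Int) - 1]) := by
  intro m
  induction m with
  | zero =>
    simp [PySem.List.pyRange_one_eq_nil (le_refl (0:Int))]
  | succ m ih =>
    have hcast : ((m + 1 : Nat) : Int) = (m : Int) + 1 := by push_cast; ring
    rw [hcast, PySem.List.pyRange_one_succ_right (by positivity : (0:Int) ≤ (m : Int)),
      List.foldl_append, List.foldl_cons, List.foldl_nil, List.map_append, ih]
    have hge : ((m : Int) ≥ k - 1) := by omega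
    by_cases hm0 : m = 0
    · subst hm0
      simp [pvStepA, PySem.List.pyRange_one_eq_nil (le_refl (0:Int)),
        show k - 1 ≤ (0:Int) by omega]
    · rw [if_neg hm0]
      have hdrop : ([(m : Int) - 1].dropWhile (fun j => decide (j ≤ (m : Int) - k)))
          = [] := by
        simp only [List.dropWhile_cons, decide_eq_true_eq]
        rw [if_pos (by omega)]
        rfl
      simp only [pvStepA, hdrop, List.reverse_nil, List.dropWhile_nil, List.nil_append,
        ge_iff_le, if_pos (by omega : k - 1 ≤ (m : Int)), PySem.List.pyGetD_zero_cons]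
      simp

-- ===== VERDICT (by name: the statement is the Claim_ definition above) =====
theorem min_of_max_in_subarrays_spec : Claim_equal_min_of_max_in_subarrays := by
  intro arr n k _ hpre
  obtain ⟨hn1, hkn, hnL⟩ := hpre
  unfold Spec_min_of_max_in_subarrays min_of_max_in_subarrays min_of_max_in_subarrays_alt
  have hn0 : (0:Int) ≤ n := by omega
  have hNe : ((n.toNat : Nat) : Int) = n := Int.toNat_of_nonneg hn0
  simp only []
  rw [PySem.List.foldl_append_ite (p := fun i => i ≥ k - 1)
    (f := fun i => (PySem.List.pyRange (max (i - k + 1) 0) i 1).foldl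
      (fun m j => if PySem.List.pyGetD arr j 0 > m then PySem.List.pyGetD arr j 0 else m)
      (PySem.List.pyGetD arr i 0)), List.nil_append]
  by_cases hk1 : 1 ≤ k
  · -- normal windows: A's deque list = the window maxima = B's rescan list
    have hres := (pv_inv arr n k hk1 hnL n.toNat (by omega)).1
    rw [hNe] at hres
    rw [hres]
    have hfil := pv_range_filter (k - 1) (by omega) n.toNat
    rw [hNe] at hfil
    rw [hfil]
    refine congrArg (fun o : Option Int => o.getD 0)
      (congrArg (fun l : List Int => PySem.List.min? l (fun x => x)) ?_)
    refine (List.map_congr_left ?_).symm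
    intro i hi
    have hib := PySem.List.mem_pyRange_one.mp hi
    exact pv_inner arr k i hk1 (by omega) (by omega)
  · -- k ≤ 0: both sides reduce to the first n elements of arr
    have hA := congrArg Prod.fst (pv_inv_nonpos arr k (by omega) n.toNat)
    simp only [hNe] at hA
    rw [hA]
    have hfil : ((PySem.List.pyRange 0 n 1).filter (fun i => decide (i ≥ k - 1)))
        = PySem.List.pyRange 0 n 1 := by
      refine List.filter_eq_self.mpr ?_
      intro a ha
      have := PySem.List.mem_pyRange_one.mp ha
      simp only [decide_eq_true_eq, ge_iff_le]
      omega
    rw [hfil]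
    refine congrArg (fun o : Option Int => o.getD 0)
      (congrArg (fun l : List Int => PySem.List.min? l (fun x => x)) ?_)
    refine (List.map_congr_left ?_).symm
    intro i hi
    have hib := PySem.List.mem_pyRange_one.mp hi
    rw [PySem.List.pyRange_one_eq_nil (by omega : i ≤ max (i - k + 1) 0), List.foldl_nil]
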